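-- pv_equiv track=rewrite | github.com/mamane19/interview-prep-dsa | python/findOccurencies.py | oddOccurrences
-- ===== SOURCE A (Python) =====
-- def oddOccurrences(arr):
--     if not arr:
--         return False
--
--     seen = {}
--     for i in range(len(arr)):
--         if arr[i] not in seen:
--             seen[arr[i]] = 1
--         else:
--             seen[arr[i]] += 1
--
--     for key in seen:
--         if seen[key] % 2 == 0:
--             return False
--     return True
-- ===== SOURCE B (Python) =====
-- def oddOccurrences(arr):
--     if not arr:
--         return False
--     seen = set()
--     odd = set()
--     for x in arr:
--         seen.add(x)
--         if x in odd:
--             odd.discard(x)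
--         else:
--             odd.add(x)
--     return seen == odd
-- ===== Notes on version B (the rewrite author's own statement) =====
-- stated objective: alternative
-- what changed: Replaces the count dictionary plus a second pass scanning counts modulo 2 with a single pass maintaining two sets -- all elements seen, and elements seen an odd number of times via parity toggling -- returning their equality.
import Mathlib
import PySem

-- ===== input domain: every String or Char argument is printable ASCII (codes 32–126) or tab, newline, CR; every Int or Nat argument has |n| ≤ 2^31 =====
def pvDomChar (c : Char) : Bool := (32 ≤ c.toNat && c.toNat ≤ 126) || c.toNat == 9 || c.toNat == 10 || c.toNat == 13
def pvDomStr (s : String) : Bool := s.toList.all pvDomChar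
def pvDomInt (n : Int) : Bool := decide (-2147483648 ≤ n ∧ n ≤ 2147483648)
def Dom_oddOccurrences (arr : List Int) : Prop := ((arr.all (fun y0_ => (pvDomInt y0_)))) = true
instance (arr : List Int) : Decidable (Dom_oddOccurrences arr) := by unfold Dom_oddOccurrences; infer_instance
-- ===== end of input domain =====

-- B replaces A's count dictionary plus mod-2 scan by one pass maintaining two sets
-- (elements seen, and elements seen an odd number of times, by parity toggling) and a set-equality test.

-- ===== PORT A =====
def oddOccurrences (arr : List Int) : Bool :=
  if arr = [] then false
  else
    let seen := arr.foldl (fun d x =>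
      if d.contains x = false then d.insert x 1 else d.insert x (d.getD x 0 + 1))
      PySem.Dict.empty
    seen.keys.all (fun k => !(PySem.Int.mod (seen.getD k 0) 2 == 0))

-- ===== PORT B =====
def oddOccurrences_alt (arr : List Int) : Bool :=
  if arr = [] then false
  else
    let p := arr.foldl (fun (p : PySem.Set Int × PySem.Set Int) x =>
      (PySem.Set.add p.1 x,
       if PySem.Set.contains p.2 x then PySem.Set.discard p.2 x else PySem.Set.add p.2 x))
      ([], [])
    PySem.Set.equal p.1 p.2

-- ===== PRECONDITION & SPEC =====
def Spec_oddOccurrences (arr : List Int) (out : Bool) : Prop := out = oddOccurrences_alt arr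
instance (arr : List Int) (out : Bool) : Decidable (Spec_oddOccurrences arr out) := by unfold Spec_oddOccurrences; infer_instance

-- ===== CLAIM (what is proved, stated in full; the proofs are below) =====
def Claim_equal_oddOccurrences : Prop := ∀ (arr : List Int), Dom_oddOccurrences arr → Spec_oddOccurrences arr (oddOccurrences arr)

-- ===== LEMMAS AND PROOFS =====

-- Python's % on a nonnegative value and positive modulus is plain Nat %.
theorem fmod_two_natCast (c : Nat) : (c : Int).fmod 2 = ((c % 2 : Nat) : Int) := by
  rw [Int.fmod_eq_emod]
  simp

-- A's counting step is the standard counter step (when the key is absent, getD is 0).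
theorem stepA_eq (d : PySem.Dict Int Int) (x : Int) :
    (if d.contains x = false then d.insert x 1 else d.insert x (d.getD x 0 + 1))
      = d.insert x (d.getD x 0 + 1) := by
  cases hc : d.contains x with
  | false =>
      have h0 : d.getD x 0 = 0 := by
        have h := PySem.Dict.contains_eq_isSome_get? (d := d) (k := x)
        rw [hc] at h
        have : d.get? x = none := by
          cases hg : d.get? x with
          | none => rfl
          | some v => rw [hg] at h; cases h
        simp [PySem.Dict.getD, this]
      simp [h0]
  | true => simp

-- The pair fold of B splits into its two independent component folds.
theorem foldB_split (l : List Int) (s o : PySem.Set Int) :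
    l.foldl (fun (p : PySem.Set Int × PySem.Set Int) x =>
      (PySem.Set.add p.1 x,
       if PySem.Set.contains p.2 x then PySem.Set.discard p.2 x else PySem.Set.add p.2 x)) (s, o)
    = (l.foldl PySem.Set.add s,
       l.foldl (fun o x => if PySem.Set.contains o x then PySem.Set.discard o x else PySem.Set.add o x) o) := by
  induction l generalizing s o with
  | nil => rfl
  | cons x l ih =>
      simp only [List.foldl_cons]
      exact ih _ _

-- Membership in the toggle fold tracks the parity of the count.
theorem mem_toggleFold (l : List Int) (o : PySem.Set Int) (y : Int) :
    (y ∈ l.foldl (fun o x => if PySem.Set.contains o x then PySem.Set.discard o x else PySem.Set.add o x) o)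
      ↔ ((y ∈ o) ↔ l.count y % 2 = 0) := by
  induction l using List.reverseRecOn generalizing y with
  | nil => simp
  | append_singleton l x ih =>
      rw [List.foldl_append]
      simp only [List.foldl_cons, List.foldl_nil]
      set s := l.foldl (fun o x => if PySem.Set.contains o x then PySem.Set.discard o x else PySem.Set.add o x) o with hs
      by_cases hxy : y = x
      · subst hxy
        have hcy : (l ++ [y]).count y = l.count y + 1 := by simp
        rw [hcy]
        by_cases hmem : y ∈ s
        · rw [if_pos ((PySem.Set.contains_iff s y).mpr hmem)]
          have h1 := (ih y).mp hmem
          simp only [PySem.Set.mem_discard]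
          constructor
          · rintro ⟨_, hne⟩; exact absurd rfl hne
          · intro h2
            by_cases ho : y ∈ o
            · have hb1 := h1.mp ho
              have hb2 := h2.mp ho
              omega
            · have hb1 : ¬ l.count y % 2 = 0 := fun hh => ho (h1.mpr hh)
              have hb2 : ¬ (l.count y + 1) % 2 = 0 := fun hh => ho (h2.mpr hh)
              omega
        · rw [if_neg (fun hcc => hmem ((PySem.Set.contains_iff s y).mp hcc))]
          have h1 : ¬ ((y ∈ o) ↔ l.count y % 2 = 0) := fun hh => hmem ((ih y).mpr hh)
          simp only [PySem.Set.mem_add]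
          constructor
          · intro _
            by_cases ho : y ∈ o
            · have hb1 : ¬ l.count y % 2 = 0 := fun hh => h1 (iff_of_true ho hh)
              exact iff_of_true ho (by omega)
            · have hb1 : l.count y % 2 = 0 := by
                by_contra hh
                exact h1 (iff_of_false ho hh)
              exact iff_of_false ho (by omega)
          · intro _; exact Or.inr trivial
      · have hcy : (l ++ [x]).count y = l.count y := by
          simp [List.count_append, List.count_singleton]
          omega
        rw [hcy, ← ih y]
        cases hc : PySem.Set.contains s x with
        | true =>
            rw [if_pos rfl]
            simp only [PySem.Set.mem_discard]
            exact ⟨fun h => h.1, fun h => ⟨h, hxy⟩⟩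
        | false =>
            rw [if_neg (by simp)]
            simp only [PySem.Set.mem_add]
            exact ⟨fun h => h.resolve_right (fun hh => absurd hh hxy), Or.inl⟩

-- ===== VERDICT (by name: the statement is the Claim_ definition above) =====
theorem oddOccurrences_spec : Claim_equal_oddOccurrences := by
  intro arr _
  unfold Spec_oddOccurrences oddOccurrences oddOccurrences_alt
  by_cases he : arr = []
  · simp [he]
  · rw [if_neg he, if_neg he]
    have hA : arr.foldl (fun d x =>
        if d.contains x = false then d.insert x 1 else d.insert x (d.getD x 0 + 1))
        PySem.Dict.empty = PySem.Dict.counter arr := by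
      have hf : (fun (d : PySem.Dict Int Int) x =>
          if d.contains x = false then d.insert x 1 else d.insert x (d.getD x 0 + 1))
          = (fun d x => d.insert x (d.getD x 0 + 1)) :=
        funext fun d => funext fun x => stepA_eq d x
      rw [hf, PySem.Dict.foldl_insert_getD_add_one_eq_counter]
    simp only [hA, foldB_split]
    rw [Bool.eq_iff_iff]
    rw [List.all_eq_true]
    rw [PySem.Set.equal_iff]
    have hofl : arr.foldl PySem.Set.add ([] : PySem.Set Int) = PySem.Set.ofList arr := rfl
    constructor
    · intro h y
      rw [hofl, PySem.Set.mem_ofList, mem_toggleFold]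
      constructor
      · intro hy
        have hk : y ∈ (PySem.Dict.counter arr).keys := by
          rw [PySem.Dict.keys_counter, PySem.Set.mem_ofList]; exact hy
        have hthis := h y hk
        rw [PySem.Dict.getD_counter] at hthis
        simp only [Bool.not_eq_eq_eq_not, Bool.not_true, beq_eq_false_iff_ne] at hthis
        have hm : ¬ ((arr.count y : Int).fmod 2 = 0) := by
          simpa [PySem.Int.mod] using hthis
        rw [fmod_two_natCast] at hm
        have hmn : arr.count y % 2 ≠ 0 := by omega
        exact iff_of_false (by simp) hmn
      · intro hy
        have hcpos : 0 < arr.count y := by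
          by_contra hcc
          have hc0 : arr.count y = 0 := by omega
          exact absurd (hy.mpr (by omega)) (by simp)
        exact List.count_pos_iff.mp hcpos
    · intro h k hk
      rw [PySem.Dict.keys_counter, PySem.Set.mem_ofList] at hk
      have := (h k)
      rw [hofl, PySem.Set.mem_ofList, mem_toggleFold] at this
      have hki := this.mp hk
      have hodd : ¬ (arr.count k % 2 = 0) := fun hc => List.not_mem_nil (hki.mpr hc)
      rw [PySem.Dict.getD_counter]
      simp only [Bool.not_eq_eq_eq_not, Bool.not_true, beq_eq_false_iff_ne]
      simp [PySem.Int.mod, fmod_two_natCast]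
      omega
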